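-- pv_equiv track=rewrite | github.com/weikunhan/leetcode-summary-python | practice/tusimple/load_balance.py | load_balance
-- ===== SOURCE A (Python) =====
-- import heapq
-- import collections
--
-- def load_balance(servers, arrivals, loads):
--     """
--     :type servers: int
--     :type arrivals: List[int]
--     :type loads: List[int]
--     :rtype: List[int]
--     """
--
--     server_value_list = collections.deque(range(servers))
--     value_dict = collections.Counter()
--     task_value_list = sorted(zip(arrivals, loads))
--     res = []
--
--     if not servers:
--
--         return res
--
--     value_pq = [(task_value_list[0][0] + task_value_list[0][1],
--                  server_value_list.popleft())]
--     value_dict[value_pq[0][1]] = task_value_list[0][1]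
--
--     for task in task_value_list[1:]:
--         if task[0] < value_pq[0][0]:
--             if server_value_list:
--                 server_value = server_value_list.popleft()
--                 heapq.heappush(value_pq, (task[0] + task[1], server_value))
--                 value_dict[server_value] += task[1]
--         else:
--             server_value_list.append(heapq.heappop(value_pq)[1])
--             server_value = server_value_list.popleft()
--             heapq.heappush(value_pq, (task[0] + task[1], server_value))
--             value_dict[server_value] += task[1]
--
--     for key, value in value_dict.items():
--         if value == value_dict.most_common()[0][1]:
--             res.append(key)
--
--     res = sorted(res)
--
--     return res
-- ===== SOURCE B (Python) =====
-- def load_balance(servers, arrivals, loads):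
--     free = list(range(servers))
--     busy = []                      # (finish_time, server_id), unsorted
--     load = {}
--     for arrival, work in sorted(zip(arrivals, loads)):
--         if busy:
--             m = min(busy)
--             if arrival >= m[0]:
--                 busy.remove(m)
--                 free.append(m[1])
--         if free:
--             s = free.pop(0)
--             busy.append((arrival + work, s))
--             load[s] = load.get(s, 0) + work
--     if not load:
--         return []
--     top = max(load.values())
--     return sorted(s for s, v in load.items() if v == top)
-- ===== Notes on version B (the rewrite author's own statement) =====
-- stated objective: simpler
-- what changed: Same simulation, but the heap becomes a plain min()-scanned list, the pre-loop special case for the first task is folded into one uniform loop (release-then-assign instead of nested branches), and the per-iteration most_common() re-sort is replaced by a single max() over the load dict.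
import Mathlib
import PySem

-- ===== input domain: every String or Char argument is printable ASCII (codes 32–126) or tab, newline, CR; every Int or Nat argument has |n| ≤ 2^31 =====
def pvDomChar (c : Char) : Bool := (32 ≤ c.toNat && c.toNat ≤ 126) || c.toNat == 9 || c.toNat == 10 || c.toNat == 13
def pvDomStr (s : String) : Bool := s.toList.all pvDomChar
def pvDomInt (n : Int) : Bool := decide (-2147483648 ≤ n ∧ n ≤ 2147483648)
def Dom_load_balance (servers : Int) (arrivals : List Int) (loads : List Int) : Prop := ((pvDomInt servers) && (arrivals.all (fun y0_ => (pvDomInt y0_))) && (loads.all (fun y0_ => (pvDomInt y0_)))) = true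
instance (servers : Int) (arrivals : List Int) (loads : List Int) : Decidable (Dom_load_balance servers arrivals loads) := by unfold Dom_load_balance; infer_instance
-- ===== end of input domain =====

-- B replaces A's heap + deque-with-a-pre-loop-special-case + per-iteration most_common() by one uniform
-- loop over all tasks with a plain min()-scanned busy list and a single max() over the load dict.

-- ===== PORT A =====
-- heapq on (finish, server) pairs is modelled as a lexicographically sorted list: value_pq[0] = head,
-- heappop = (head, tail), heappush = ordered insert.  This is observationally exact here: A reads the
-- heap only through value_pq[0] and heappop, i.e. only through its unique minimal tuple value.
def pvLexLt (a b : Int × Int) : Bool :=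
  decide (a.1 < b.1) || (!decide (b.1 < a.1) && decide (a.2 < b.2))

-- one iteration of A's 'for task in task_value_list[1:]' loop; state = (deque, heap, Counter)
def pvStepA (st : List Int × List (Int × Int) × PySem.Dict Int Int) (task : Int × Int) :
    List Int × List (Int × Int) × PySem.Dict Int Int :=
  let free := st.1
  let pq := st.2.1
  let d := st.2.2
  let top := pq.headD (0, 0)          -- value_pq[0]; pq is never empty when reached under Pre_
  if task.1 < top.1 then
    match free with
    | [] => (free, pq, d)
    | s :: rest => (rest, PySem.List.insertBy pvLexLt (task.1 + task.2, s) pq, d.modify s 0 (· + task.2))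
  else
    match free ++ [top.2] with        -- append(heappop(pq)[1]) then popleft()
    | [] => (free, pq.tail, d)        -- unreachable: the list just gained an element
    | s :: rest => (rest, PySem.List.insertBy pvLexLt (task.1 + task.2, s) pq.tail, d.modify s 0 (· + task.2))

-- final 'for key, value in value_dict.items(): if value == value_dict.most_common()[0][1]' loop;
-- most_common() is Python's sorted(items, key=count, reverse=True) (stable)
def pvFinishA (d : PySem.Dict Int Int) : List Int :=
  PySem.List.sorted
    (d.items.foldl
      (fun r kv =>
        if kv.2 == ((PySem.List.sorted d.items (fun p => p.2) true).headD (0, 0)).2 then r ++ [kv.1] else r)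
      [])
    (fun x => x) false

def load_balance (servers : Int) (arrivals : List Int) (loads : List Int) : List Int :=
  if servers == 0 then [] else
  let tasks := PySem.List.sorted2 (List.zip arrivals loads) (fun p => p.1) (fun p => p.2)
  match tasks, PySem.List.pyRange 0 servers 1 with
  | t0 :: rest, s0 :: free0 =>
      let st := rest.foldl pvStepA (free0, [(t0.1 + t0.2, s0)], (PySem.Dict.empty).insert s0 t0.2)
      pvFinishA st.2.2
  | _, _ => []                        -- unreachable under Pre_ (Python raises IndexError here)

-- ===== PORT B =====
-- one iteration of B's uniform loop; state = (free, busy, load)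
def pvStepB (st : List Int × List (Int × Int) × PySem.Dict Int Int) (task : Int × Int) :
    List Int × List (Int × Int) × PySem.Dict Int Int :=
  let free := st.1
  let busy := st.2.1
  let load := st.2.2
  let fb :=
    match PySem.List.min2? busy (fun p => p.1) (fun p => p.2) with
    | none => (free, busy)            -- 'if busy:' fails
    | some m =>
        if m.1 ≤ task.1 then (free ++ [m.2], (PySem.List.remove? busy m).getD busy)  -- remove? is some: m ∈ busy
        else (free, busy)
  match fb.1 with
  | [] => (fb.1, fb.2, load)
  | s :: frest => (frest, fb.2 ++ [(task.1 + task.2, s)], load.modify s 0 (· + task.2))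

def load_balance_alt (servers : Int) (arrivals : List Int) (loads : List Int) : List Int :=
  let st := (PySem.List.sorted2 (List.zip arrivals loads) (fun p => p.1) (fun p => p.2)).foldl
      pvStepB (PySem.List.pyRange 0 servers 1, ([] : List (Int × Int)), (PySem.Dict.empty : PySem.Dict Int Int))
  match PySem.List.max? st.2.2.values (fun v => v) with
  | none => []
  | some top =>
      PySem.List.sorted ((st.2.2.items.filter (fun kv => kv.2 == top)).map (fun kv => kv.1)) (fun x => x) false

-- ===== PRECONDITION & SPEC =====
-- Pre_ excludes exactly the inputs where A raises IndexError: a negative server count (popleft from an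
-- empty deque) and a nonzero server count with an empty task list (task_value_list[0]).
def Pre_load_balance (servers : Int) (arrivals : List Int) (loads : List Int) : Prop :=
  servers = 0 ∨ (0 < servers ∧ arrivals ≠ [] ∧ loads ≠ [])
instance (servers : Int) (arrivals : List Int) (loads : List Int) : Decidable (Pre_load_balance servers arrivals loads) := by unfold Pre_load_balance; infer_instance

def pvWitness_load_balance : Int × List Int × List Int := (2, [1, 2, 3], [3, 2, 1])

def Spec_load_balance (servers : Int) (arrivals : List Int) (loads : List Int) (out : List Int) : Prop := out = load_balance_alt servers arrivals loads
instance (servers : Int) (arrivals : List Int) (loads : List Int) (out : List Int) : Decidable (Spec_load_balance servers arrivals loads out) := by unfold Spec_load_balance; infer_instance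

-- ===== CLAIM (what is proved, stated in full; the proofs are below) =====
def Claim_equal_load_balance : Prop := ∀ (servers : Int) (arrivals : List Int) (loads : List Int), Dom_load_balance servers arrivals loads → Pre_load_balance servers arrivals loads → Spec_load_balance servers arrivals loads (load_balance servers arrivals loads)

-- ===== LEMMAS AND PROOFS =====

-- the strict lexicographic order pvLexLt decides, as a Prop
def pvPLt (a b : Int × Int) : Prop := a.1 < b.1 ∨ (a.1 = b.1 ∧ a.2 < b.2)

theorem pvLexLt_iff (a b : Int × Int) : pvLexLt a b = true ↔ pvPLt a b := by
  simp [pvLexLt, pvPLt]; omega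

-- the relation A's model keeps the heap sorted by
def pvR (a b : Int × Int) : Prop := ¬ pvPLt b a

-- the invariant tying A's loop state to B's loop state
def pvInv (a b : List Int × List (Int × Int) × PySem.Dict Int Int) : Prop :=
  a.1 = b.1 ∧ a.2.1.Perm b.2.1 ∧ a.2.1.Pairwise pvR ∧ a.2.1 ≠ [] ∧ a.2.2 = b.2.2 ∧ a.2.2.items ≠ []

theorem pv_insertBy_perm (x : Int × Int) (l : List (Int × Int)) :
    (PySem.List.insertBy pvLexLt x l).Perm (x :: l) := by
  induction l with
  | nil => simp [PySem.List.insertBy]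
  | cons y ys ih =>
    rw [PySem.List.insertBy]
    split
    · exact List.Perm.refl _
    · exact ((ih.cons y).trans (List.Perm.swap x y ys))

theorem pv_insertBy_ne_nil (x : Int × Int) (l : List (Int × Int)) :
    PySem.List.insertBy pvLexLt x l ≠ [] := by
  cases l with
  | nil => simp [PySem.List.insertBy]
  | cons y ys => rw [PySem.List.insertBy]; split <;> simp

theorem pv_insertBy_pairwise (x : Int × Int) (l : List (Int × Int)) (h : l.Pairwise pvR) :
    (PySem.List.insertBy pvLexLt x l).Pairwise pvR := by
  induction l with
  | nil => simp [PySem.List.insertBy]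
  | cons y ys ih =>
    rw [PySem.List.insertBy]
    rcases List.pairwise_cons.1 h with ⟨hy, hys⟩
    split
    · rename_i hlt
      have hxy : pvPLt x y := (pvLexLt_iff x y).1 hlt
      refine List.pairwise_cons.2 ⟨?_, h⟩
      intro z hz
      rcases List.mem_cons.1 hz with rfl | hz
      · unfold pvR pvPLt at *; omega
      · have := hy z hz
        unfold pvR pvPLt at *; omega
    · rename_i hnlt
      have hxy : ¬ pvPLt x y := fun hc => hnlt ((pvLexLt_iff x y).2 hc)
      refine List.pairwise_cons.2 ⟨?_, ih hys⟩
      intro z hz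
      have hz' := (pv_insertBy_perm x ys).mem_iff.1 hz
      rcases List.mem_cons.1 hz' with rfl | hz'
      · exact hxy
      · exact hy z hz'

-- min2?'s fold step, named so the accumulator induction below can speak about it
def pvMinStep (acc : Option (Int × Int)) (x : Int × Int) : Option (Int × Int) :=
  match acc with
  | none => some x
  | some m => if (decide (x.1 < m.1) || (!decide (m.1 < x.1) && decide (x.2 < m.2))) = true then some x else some m

theorem pv_min2_eq (busy : List (Int × Int)) :
    PySem.List.min2? busy (fun p => p.1) (fun p => p.2) = busy.foldl pvMinStep none := by
  unfold PySem.List.min2?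
  congr 1
  funext acc x
  cases acc <;> rfl

theorem pv_min2_go (xs : List (Int × Int)) (m : Int × Int) :
    ∃ m', xs.foldl pvMinStep (some m) = some m' ∧ m' ∈ m :: xs ∧ ∀ y ∈ m :: xs, ¬ pvPLt y m' := by
  induction xs generalizing m with
  | nil =>
    refine ⟨m, rfl, List.mem_cons_self, ?_⟩
    intro y hy
    rcases List.mem_cons.1 hy with rfl | hy
    · unfold pvPLt; omega
    · cases hy
  | cons x xs ih =>
    by_cases hc : (decide (x.1 < m.1) || (!decide (m.1 < x.1) && decide (x.2 < m.2))) = true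
    · have hstep : pvMinStep (some m) x = some x := by simp [pvMinStep, hc]
      rcases ih x with ⟨m', h1, h2, h3⟩
      refine ⟨m', by simp [List.foldl, hstep, h1], ?_, ?_⟩
      · rcases List.mem_cons.1 h2 with rfl | h2
        · exact List.mem_cons_of_mem _ List.mem_cons_self
        · exact List.mem_cons_of_mem _ (List.mem_cons_of_mem _ h2)
      · intro y hy
        rcases List.mem_cons.1 hy with rfl | hy
        · have hxm' : ¬ pvPLt x m' := h3 x List.mem_cons_self
          simp [pvPLt] at hc hxm' ⊢
          omega
        · exact h3 y hy
    · have hstep : pvMinStep (some m) x = some m := by simp [pvMinStep] at hc ⊢; omega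
      rcases ih m with ⟨m', h1, h2, h3⟩
      refine ⟨m', by simp [List.foldl, hstep, h1], ?_, ?_⟩
      · rcases List.mem_cons.1 h2 with rfl | h2
        · exact List.mem_cons_self
        · exact List.mem_cons_of_mem _ (List.mem_cons_of_mem _ h2)
      · intro y hy
        rcases List.mem_cons.1 hy with rfl | hy
        · exact h3 y List.mem_cons_self
        · rcases List.mem_cons.1 hy with rfl | hy
          · have hmm' : ¬ pvPLt m m' := h3 m List.mem_cons_self
            simp [pvPLt] at hc ⊢; unfold pvPLt at hmm'; omega
          · exact h3 y (List.mem_cons_of_mem _ hy)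

theorem pv_min2?_spec (busy : List (Int × Int)) (hne : busy ≠ []) :
    ∃ m, PySem.List.min2? busy (fun p => p.1) (fun p => p.2) = some m ∧ m ∈ busy ∧
      ∀ y ∈ busy, ¬ pvPLt y m := by
  rcases busy with _ | ⟨x, xs⟩
  · exact absurd rfl hne
  · rw [pv_min2_eq]
    have hfirst : pvMinStep none x = some x := rfl
    rcases pv_min2_go xs x with ⟨m', h1, h2, h3⟩
    exact ⟨m', by simp [List.foldl, hfirst, h1], h2, h3⟩

-- head of A's sorted heap is exactly B's min()
theorem pv_head_eq_min (m : Int × Int) (t busy : List (Int × Int))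
    (hperm : (m :: t).Perm busy) (hpw : (m :: t).Pairwise pvR)
    {mb : Int × Int} (hmb : PySem.List.min2? busy (fun p => p.1) (fun p => p.2) = some mb) :
    mb = m := by
  have hne : busy ≠ [] := by
    intro h; subst h; simpa using hperm.eq_nil
  rcases pv_min2?_spec busy hne with ⟨m2, h1, h2, h3⟩
  rw [hmb] at h1; injection h1 with h1; subst h1
  have hmmem : m ∈ busy := hperm.subset List.mem_cons_self
  have h4 : ¬ pvPLt m mb := h3 m hmmem
  have hmbmem : mb ∈ m :: t := hperm.symm.subset h2
  rcases List.mem_cons.1 hmbmem with rfl | hmbt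
  · rfl
  · have : pvR m mb := (List.pairwise_cons.1 hpw).1 mb hmbt
    unfold pvR pvPLt at *
    have : mb.1 = m.1 ∧ mb.2 = m.2 := by omega
    exact Prod.ext this.1 this.2

theorem pv_insert_ne_nil (d : PySem.Dict Int Int) (k v : Int) :
    ((d.insert k v).items) ≠ [] := by
  simp only [PySem.Dict.insert]
  split_ifs with h
  · intro hc
    simp only at hc
    rw [List.map_eq_nil_iff] at hc
    simp [PySem.Dict.contains, hc] at h
  · simp

theorem pv_dict_ne_nil (d : PySem.Dict Int Int) (k dflt : Int) (f : Int → Int) :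
    (d.modify k dflt f).items ≠ [] := by
  simp only [PySem.Dict.modify]
  exact pv_insert_ne_nil _ _ _

-- the Counter's 'value_dict[s] = v' on a fresh key agrees with B's 'load[s] = load.get(s, 0) + v'
theorem pv_modify_empty (k v : Int) :
    (PySem.Dict.empty : PySem.Dict Int Int).modify k 0 (· + v) = (PySem.Dict.empty).insert k v := by
  simp [PySem.Dict.modify, PySem.Dict.getD, PySem.Dict.get?, PySem.Dict.empty]

theorem pv_step (a b : List Int × List (Int × Int) × PySem.Dict Int Int) (t : Int × Int)
    (h : pvInv a b) : pvInv (pvStepA a t) (pvStepB b t) := by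
  obtain ⟨f, pq, d⟩ := a
  obtain ⟨f2, bb, d2⟩ := b
  obtain ⟨hf, hperm, hpw, hnil, hd, hdne⟩ := h
  simp only at hf hperm hpw hnil hd hdne
  subst hf hd
  cases pq with
  | nil => exact absurd rfl hnil
  | cons m tl =>
  have hbne : bb ≠ [] := by intro hh; subst hh; simpa using hperm.eq_nil
  rcases pv_min2?_spec bb hbne with ⟨mb, hmb, hmem, hmin⟩
  have heq : mb = m := pv_head_eq_min m tl bb hperm hpw hmb
  rw [heq] at hmb
  have hperm' : tl.Perm (bb.erase m) := by
    have := hperm.erase m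
    rwa [List.erase_cons_head] at this
  have hrem : (PySem.List.remove? bb m).getD bb = bb.erase m := by
    rw [PySem.List.remove?_eq_some_erase bb m (hperm.subset List.mem_cons_self)]; rfl
  unfold pvStepA pvStepB
  simp only [hmb, List.headD_cons]
  by_cases hlt : t.1 < m.1
  · rw [if_pos hlt, if_neg (by omega)]
    cases f with
    | nil =>
      exact ⟨rfl, hperm, hpw, by simp, rfl, hdne⟩
    | cons s rest =>
      refine ⟨rfl, ?_, pv_insertBy_pairwise _ _ hpw, pv_insertBy_ne_nil _ _, rfl, pv_dict_ne_nil _ _ _ _⟩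
      exact (pv_insertBy_perm _ _).trans ((hperm.cons _).trans (List.perm_append_singleton _ _).symm)
  · rw [if_neg hlt, if_pos (by omega), hrem]
    have hpwt : tl.Pairwise pvR := (List.pairwise_cons.1 hpw).2
    cases f with
    | nil =>
      simp only [List.nil_append, List.tail_cons]
      refine ⟨rfl, ?_, pv_insertBy_pairwise _ _ hpwt, pv_insertBy_ne_nil _ _, rfl, pv_dict_ne_nil _ _ _ _⟩
      exact (pv_insertBy_perm _ _).trans ((hperm'.cons _).trans (List.perm_append_singleton _ _).symm)
    | cons s rest =>
      simp only [List.cons_append, List.tail_cons]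
      refine ⟨rfl, ?_, pv_insertBy_pairwise _ _ hpwt, pv_insertBy_ne_nil _ _, rfl, pv_dict_ne_nil _ _ _ _⟩
      exact (pv_insertBy_perm _ _).trans ((hperm'.cons _).trans (List.perm_append_singleton _ _).symm)

theorem pv_fold (ts : List (Int × Int)) (a b : List Int × List (Int × Int) × PySem.Dict Int Int)
    (h : pvInv a b) : pvInv (ts.foldl pvStepA a) (ts.foldl pvStepB b) := by
  induction ts generalizing a b with
  | nil => exact h
  | cons t ts ih => exact ih _ _ (pv_step a b t h)

-- the two final passes agree on any nonempty dict
theorem pv_finish (d : PySem.Dict Int Int) (hne : d.items ≠ []) :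
    pvFinishA d =
      (match PySem.List.max? d.values (fun v => v) with
       | none => []
       | some top =>
           PySem.List.sorted ((d.items.filter (fun kv => kv.2 == top)).map (fun kv => kv.1)) (fun x => x) false) := by
  have hvals : d.values = d.items.map (fun p => p.2) := rfl
  have hvne : d.values ≠ [] := by simp [hvals, hne]
  have hsne : PySem.List.sorted d.items (fun p => p.2) true ≠ [] := by
    rw [Ne, PySem.List.sorted_eq_nil_iff]; exact hne
  obtain ⟨m, t2, hs⟩ := List.exists_cons_of_ne_nil hsne
  have hmax : ∃ top, PySem.List.max? d.values (fun v => v) = some top := by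
    rcases hh : PySem.List.max? d.values (fun v => v) with _ | top
    · rw [PySem.List.max?_eq_none_iff] at hh; exact absurd hh hvne
    · exact ⟨top, rfl⟩
  obtain ⟨top, htop⟩ := hmax
  have hmem : m ∈ d.items := by
    have := PySem.List.sorted_perm d.items (fun p => p.2) true
    rw [hs] at this
    exact this.subset List.mem_cons_self
  have h1 : ∀ y ∈ d.items, y.2 ≤ m.2 := PySem.List.key_head_sorted_rev_ge d.items (fun p => p.2) hs
  have h2 : ∀ v ∈ d.values, v ≤ top := PySem.List.max?_isMax htop
  have h3 : top ∈ d.values := PySem.List.max?_mem htop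
  have hteq : m.2 = top := by
    apply le_antisymm
    · exact h2 m.2 (by rw [hvals]; exact List.mem_map_of_mem hmem)
    · rw [hvals] at h3
      obtain ⟨y, hy, rfl⟩ := List.mem_map.1 h3
      exact h1 y hy
  rw [htop]
  unfold pvFinishA
  rw [hs]
  simp only [List.headD_cons, hteq]
  rw [PySem.List.foldl_append_if (fun kv => kv.2 == top) (fun kv => kv.1) d.items []]
  simp

-- with no servers B's loop never changes the empty state
theorem pv_idle (ts : List (Int × Int)) :
    ts.foldl pvStepB (([] : List Int), ([] : List (Int × Int)), (PySem.Dict.empty : PySem.Dict Int Int))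
      = ([], [], PySem.Dict.empty) := by
  induction ts with
  | nil => rfl
  | cons t ts ih => simpa [pvStepB, PySem.List.min2?] using ih

-- ===== VERDICT (by name: the statement is the Claim_ definition above) =====
theorem load_balance_spec : Claim_equal_load_balance := by
  intro s a l _ hpre
  unfold Spec_load_balance
  rcases hpre with rfl | ⟨hs, ha, hl⟩
  · unfold load_balance load_balance_alt
    have hr : PySem.List.pyRange 0 0 1 = ([] : List Int) := rfl
    rw [hr]
    simp only [pv_idle]
    rfl
  · have hzip : List.zip a l ≠ [] := by
      cases a with
      | nil => exact absurd rfl ha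
      | cons x xs =>
        cases l with
        | nil => exact absurd rfl hl
        | cons y ys => simp [List.zip]
    have htasks : PySem.List.sorted2 (List.zip a l) (fun p => p.1) (fun p => p.2) ≠ [] := by
      intro hc
      have hp := PySem.List.sorted2_perm (List.zip a l) (fun p => p.1) (fun p => p.2) false
      rw [hc] at hp
      exact hzip hp.symm.eq_nil
    obtain ⟨t0, rest, hts⟩ := List.exists_cons_of_ne_nil htasks
    have hrange : PySem.List.pyRange 0 s 1 = 0 :: PySem.List.pyRange 1 s 1 := by
      simpa using PySem.List.pyRange_one_cons (show (0 : Int) < s from hs)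
    unfold load_balance load_balance_alt
    rw [hts, hrange, if_neg (by simp; omega)]
    show pvFinishA ((rest.foldl pvStepA (PySem.List.pyRange 1 s, [(t0.1 + t0.2, 0)], (PySem.Dict.empty).insert 0 t0.2)).2.2)
      = (match PySem.List.max? (((t0 :: rest).foldl pvStepB (0 :: PySem.List.pyRange 1 s, ([] : List (Int × Int)), (PySem.Dict.empty : PySem.Dict Int Int))).2.2).values (fun v => v) with
        | none => []
        | some top => PySem.List.sorted (((((t0 :: rest).foldl pvStepB (0 :: PySem.List.pyRange 1 s, ([] : List (Int × Int)), (PySem.Dict.empty : PySem.Dict Int Int))).2.2).items.filter (fun kv => kv.2 == top)).map (fun kv => kv.1)) (fun x => x) false)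
    rw [List.foldl_cons]
    have hB1 : pvStepB (0 :: PySem.List.pyRange 1 s 1, ([] : List (Int × Int)), (PySem.Dict.empty : PySem.Dict Int Int)) t0
        = (PySem.List.pyRange 1 s 1, [(t0.1 + t0.2, 0)], (PySem.Dict.empty).insert 0 t0.2) := by
      unfold pvStepB
      simp only [PySem.List.min2?, List.foldl]
      rw [pv_modify_empty]
      simp
    rw [hB1]
    have hinv := pv_fold rest
      (PySem.List.pyRange 1 s 1, [(t0.1 + t0.2, 0)], (PySem.Dict.empty).insert 0 t0.2)
      (PySem.List.pyRange 1 s 1, [(t0.1 + t0.2, 0)], (PySem.Dict.empty).insert 0 t0.2)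
      ⟨rfl, List.Perm.refl _, by simp [pvR], by simp, rfl, pv_insert_ne_nil _ _ _⟩
    obtain ⟨h1, h2, h3, h4, h5, h6⟩ := hinv
    rw [← h5]
    exact pv_finish _ h6
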